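-- pv_equiv track=rewrite | github.com/bogoconic1/Qgentic-AI | task/us-patent-phrase-to-phrase-matching/outputs/2/code_2_v2.py | encode_words
-- ===== SOURCE A (Python) =====
-- from typing import List, Tuple, Dict
--
-- PAD_ID = 0
--
-- UNK_ID = 1
--
-- def normalize_text_for_tokenization(s: str) -> str:
--     punct = [",", ".", ";", ":", "(", ")", "[", "]", "{", "}", "/", "\\", "-", "+", "=", "*", "&", "^", "%", "$", "#", "@", "!", "?", "|", "<", ">"]
--     for p in punct:
--         s = s.replace(p, f" {p} ")
--     s = " ".join(s.split())
--     return s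
--
-- def whitespace_tokenize(text: str) -> List[str]:
--     return normalize_text_for_tokenization(text).split()
--
-- def encode_words(text: str, stoi: Dict[str,int], max_len: int) -> List[int]:
--     toks = ["[CLS]"] + whitespace_tokenize(text)
--     ids = [stoi.get(tok, UNK_ID) for tok in toks]
--     if len(ids) > max_len:
--         ids = ids[:max_len]
--     else:
--         ids = ids + [PAD_ID] * (max_len - len(ids))
--     return ids
-- ===== SOURCE B (Python) =====
-- PAD_ID = 0
-- UNK_ID = 1
-- PUNCT = set(",.;:()[]{}/\\-+=*&^%$#@!?|<>")
--
-- def _tokenize(text):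
--     toks = []
--     cur = ""
--     for c in text:
--         if c in PUNCT:
--             if cur:
--                 toks.append(cur)
--                 cur = ""
--             toks.append(c)
--         elif c.isspace():
--             if cur:
--                 toks.append(cur)
--                 cur = ""
--         else:
--             cur += c
--     if cur:
--         toks.append(cur)
--     return toks
--
-- def encode_words(text, stoi, max_len):
--     ids = [stoi.get(t, UNK_ID) for t in ["[CLS]"] + _tokenize(text)]
--     return ids[:max_len] + [PAD_ID] * (max_len - len(ids))
-- ===== Notes on version B (the rewrite author's own statement) =====
-- stated objective: simpler
-- what changed: Tokenization is rewritten as a single character-level pass with a flush-current-word state machine (punctuation chars become their own tokens, whitespace flushes the current word) instead of 27 sequential whole-string str.replace passes followed by split/join/re-split; the truncate-or-pad tail becomes the single expression ids[:max_len] + [PAD_ID]*(max_len-len(ids)).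
import Mathlib
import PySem

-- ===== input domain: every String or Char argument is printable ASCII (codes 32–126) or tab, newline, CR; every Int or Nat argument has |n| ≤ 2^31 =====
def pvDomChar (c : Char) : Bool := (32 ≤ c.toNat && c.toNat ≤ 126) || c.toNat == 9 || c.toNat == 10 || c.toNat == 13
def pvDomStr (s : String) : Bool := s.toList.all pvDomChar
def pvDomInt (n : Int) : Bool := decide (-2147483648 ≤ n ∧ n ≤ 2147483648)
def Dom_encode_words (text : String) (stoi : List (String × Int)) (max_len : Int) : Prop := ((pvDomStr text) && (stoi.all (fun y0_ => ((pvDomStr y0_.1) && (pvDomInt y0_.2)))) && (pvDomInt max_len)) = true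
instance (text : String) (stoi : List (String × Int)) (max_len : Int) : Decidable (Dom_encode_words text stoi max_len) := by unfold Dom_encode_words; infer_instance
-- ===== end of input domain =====

-- B rewrites the tokenizer as one character-level pass (flush-current-word state machine) instead
-- of 27 sequential whole-string replace passes plus a join/re-split, and the pad/truncate tail
-- becomes a single slice-and-pad expression.  Objective: simpler.

-- ===== PORT A =====
def pvPunctA : List Char := [',', '.', ';', ':', '(', ')', '[', ']', '{', '}', '/', '\\', '-', '+', '=', '*', '&', '^', '%', '$', '#', '@', '!', '?', '|', '<', '>']

-- the 27 sequential `s = s.replace(p, f" {p} ")` calls, folded over the punct list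
def pvReplaceAll (s : List Char) : List Char :=
  pvPunctA.foldl (fun s p => PySem.Chars.replace s [p] [' ', p, ' ']) s

def normalize_text_for_tokenization (s : String) : String :=
  let s1 : String := String.ofList (pvReplaceAll s.toList)
  PySem.Str.join " " (PySem.Str.split₀ s1)

def whitespace_tokenize (text : String) : List String :=
  PySem.Str.split₀ (normalize_text_for_tokenization text)

def encode_words (text : String) (stoi : List (String × Int)) (max_len : Int) : List Int :=
  let toks := "[CLS]" :: whitespace_tokenize text
  let ids := toks.map (fun tok => (PySem.Dict.mk stoi).getD tok 1)
  if (ids.length : Int) > max_len then PySem.List.slice ids none (some max_len)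
  else ids ++ List.replicate (max_len - (ids.length : Int)).toNat 0

-- ===== PORT B =====
def pvPunctB : List Char := [',', '.', ';', ':', '(', ')', '[', ']', '{', '}', '/', '\\', '-', '+', '=', '*', '&', '^', '%', '$', '#', '@', '!', '?', '|', '<', '>']

-- Source B's `for c in text` loop: state = (toks so far, current word)
def pvTokLoop : List Char → List (List Char) → List Char → List (List Char)
  | [], toks, cur => if cur.isEmpty then toks else toks ++ [cur]
  | c :: rest, toks, cur =>
    if pvPunctB.contains c then
      pvTokLoop rest ((if cur.isEmpty then toks else toks ++ [cur]) ++ [[c]]) []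
    else if PySem.Chars.isspace c then
      pvTokLoop rest (if cur.isEmpty then toks else toks ++ [cur]) []
    else
      pvTokLoop rest toks (cur ++ [c])

def pvTokenize (text : String) : List String :=
  (pvTokLoop text.toList [] []).map String.ofList

def encode_words_alt (text : String) (stoi : List (String × Int)) (max_len : Int) : List Int :=
  let ids := ("[CLS]" :: pvTokenize text).map (fun t => (PySem.Dict.mk stoi).getD t 1)
  PySem.List.slice ids none (some max_len) ++ List.replicate (max_len - (ids.length : Int)).toNat 0

-- ===== PRECONDITION & SPEC =====
def Spec_encode_words (text : String) (stoi : List (String × Int)) (max_len : Int) (out : List Int) : Prop := out = encode_words_alt text stoi max_len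
instance (text : String) (stoi : List (String × Int)) (max_len : Int) (out : List Int) : Decidable (Spec_encode_words text stoi max_len out) := by unfold Spec_encode_words; infer_instance

-- ===== CLAIM (what is proved, stated in full; the proofs are below) =====
def Claim_equal_encode_words : Prop := ∀ (text : String) (stoi : List (String × Int)) (max_len : Int), Dom_encode_words text stoi max_len → Spec_encode_words text stoi max_len (encode_words text stoi max_len)

-- ===== LEMMAS AND PROOFS =====

-- `pvExpandP P c` is what the sequential replaces turn one character into
def pvExpandP (P : List Char) (c : Char) : List Char :=
  if P.contains c then [' ', c, ' '] else [c]

lemma pvFlatAssoc {a b c : Type} (l : List a) (f : a → List b) (g : b → List c) :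
    (l.flatMap f).flatMap g = l.flatMap (fun x => (f x).flatMap g) := by
  induction l <;> simp [*]

-- single-character str.replace is a flatMap
lemma pvReplGo (p : Char) (new : List Char) :
    ∀ (l acc : List Char), PySem.Chars.replace.go [p] new l.length l acc
      = acc.reverse ++ l.flatMap (fun c => if c == p then new else [c]) := by
  intro l
  induction l with
  | nil => intro acc; rw [PySem.Chars.replace.go.eq_def]; simp
  | cons c t ih =>
    intro acc
    rw [PySem.Chars.replace.go.eq_def]
    by_cases h : c = p
    · subst h
      simp [List.isPrefixOf, ih]
    · have hp : [p].isPrefixOf (c :: t) = false := by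
        simp [List.isPrefixOf]; exact fun hh => absurd hh.symm h
      simp [hp, ih, h]

lemma pvReplOne (s : List Char) (p : Char) (new : List Char) :
    PySem.Chars.replace s [p] new = s.flatMap (fun c => if c == p then new else [c]) := by
  unfold PySem.Chars.replace
  simp [pvReplGo]

lemma pvFoldRepl : ∀ (P : List Char) (cs : List Char), P.Nodup → (' ' ∉ P) →
    P.foldl (fun s p => PySem.Chars.replace s [p] [' ', p, ' ']) cs = cs.flatMap (pvExpandP P) := by
  intro P
  induction P with
  | nil =>
    intro cs _ _
    induction cs with
    | nil => simp
    | cons a t iht => simpa [pvExpandP] using iht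
  | cons p P' ih =>
    intro cs hnd hsp
    have hp' : p ∉ P' := by simp at hnd; exact hnd.1
    have hnd' : P'.Nodup := by simp at hnd; exact hnd.2
    have hsp' : ' ' ∉ P' := by simp at hsp; exact hsp.2
    have hps : p ≠ ' ' := by simp at hsp; exact fun hh => hsp.1 hh.symm
    simp only [List.foldl_cons]
    rw [ih _ hnd' hsp', pvReplOne, pvFlatAssoc]
    congr 1
    funext x
    by_cases hx : x = p
    · subst hx
      simp [pvExpandP, hp', hsp']
    · by_cases hxm : x ∈ P' <;> simp [pvExpandP, hx, hxm]

-- pvTokLoop emits its toks argument as a prefix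
lemma pvTokLoop_prefix : ∀ (cs : List Char) (toks : List (List Char)) (cur : List Char),
    pvTokLoop cs toks cur = toks ++ pvTokLoop cs [] cur := by
  intro cs
  induction cs with
  | nil => intro toks cur; by_cases h : cur.isEmpty <;> simp [pvTokLoop, h]
  | cons c rest ih =>
    intro toks cur
    simp only [pvTokLoop]
    split_ifs <;> (conv_lhs => rw [ih]) <;> (conv_rhs => rw [ih]) <;> simp

lemma pvPunctNotSpace : ∀ c ∈ pvPunctB, PySem.Chars.isspace c = false := by
  intro c hc
  fin_cases hc <;> decide

-- the three shapes of one split₀.go step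
lemma pvGoNil (cur : List Char) (acc : List (List Char)) :
    PySem.Chars.split₀.go [] cur acc
      = acc.reverse ++ (if cur.isEmpty then [] else [cur.reverse]) := by
  rw [PySem.Chars.split₀.go.eq_def]
  by_cases h : cur.isEmpty <;> simp [h]

lemma pvGoSpace (c : Char) (hc : PySem.Chars.isspace c = true) (s cur : List Char)
    (acc : List (List Char)) :
    PySem.Chars.split₀.go (c :: s) cur acc
      = PySem.Chars.split₀.go s [] (if cur.isEmpty then acc else cur.reverse :: acc) := by
  rw [PySem.Chars.split₀.go.eq_def]
  by_cases h : cur.isEmpty <;> simp [hc, h]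

lemma pvGoChar (c : Char) (hc : PySem.Chars.isspace c = false) (s cur : List Char)
    (acc : List (List Char)) :
    PySem.Chars.split₀.go (c :: s) cur acc = PySem.Chars.split₀.go s (c :: cur) acc := by
  rw [PySem.Chars.split₀.go.eq_def]; simp [hc]

-- split₀.go over the expanded character stream is exactly B's one-pass loop
lemma pvGoExpand : ∀ (cs : List Char) (cur : List Char) (acc : List (List Char)),
    PySem.Chars.split₀.go (cs.flatMap (pvExpandP pvPunctB)) cur acc
      = acc.reverse ++ pvTokLoop cs [] cur.reverse := by
  intro cs
  induction cs with
  | nil =>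
    intro cur acc
    simp only [List.flatMap_nil]
    rw [pvGoNil]
    by_cases h : cur.isEmpty <;> simp [pvTokLoop, h]
  | cons c rest ih =>
    intro cur acc
    rw [List.flatMap_cons]
    by_cases hc : c ∈ pvPunctB
    · have hcs : PySem.Chars.isspace c = false := pvPunctNotSpace c hc
      have hexp : pvExpandP pvPunctB c = [' ', c, ' '] := by simp [pvExpandP, hc]
      rw [hexp]
      simp only [List.cons_append, List.nil_append]
      rw [pvGoSpace ' ' (by decide), pvGoChar c hcs, pvGoSpace ' ' (by decide)]
      simp only [List.isEmpty_cons, Bool.false_eq_true, if_false, List.reverse_cons,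
        List.reverse_nil, List.nil_append]
      rw [ih]
      by_cases h : cur = []
      · subst h
        simp [pvTokLoop, hc, pvTokLoop_prefix rest [[c]]]
      · simp [pvTokLoop, hc, h, pvTokLoop_prefix rest [cur.reverse, [c]]]
    · by_cases hs : PySem.Chars.isspace c = true
      · have hexp : pvExpandP pvPunctB c = [c] := by simp [pvExpandP, hc]
        rw [hexp]
        simp only [List.cons_append, List.nil_append]
        rw [pvGoSpace c hs, ih]
        by_cases h : cur = []
        · subst h
          simp [pvTokLoop, hc, hs]
        · simp [pvTokLoop, hc, hs, h, pvTokLoop_prefix rest [cur.reverse]]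
      · have hexp : pvExpandP pvPunctB c = [c] := by simp [pvExpandP, hc]
        rw [hexp]
        simp only [List.cons_append, List.nil_append]
        rw [pvGoChar c (by simpa using hs), ih]
        simp [pvTokLoop, hc, hs]

-- every word produced by split₀ is nonempty and whitespace-free
lemma pvGoodGo : ∀ (s cur : List Char) (acc : List (List Char)),
    (∀ c ∈ cur, PySem.Chars.isspace c = false) →
    (∀ w ∈ acc, w ≠ [] ∧ ∀ c ∈ w, PySem.Chars.isspace c = false) →
    ∀ w ∈ PySem.Chars.split₀.go s cur acc, w ≠ [] ∧ ∀ c ∈ w, PySem.Chars.isspace c = false := by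
  intro s
  induction s with
  | nil =>
    intro cur acc hcur hacc w hw
    rw [pvGoNil] at hw
    rcases List.mem_append.mp hw with h | h
    · exact hacc w (List.mem_reverse.mp h)
    · by_cases hs : cur = []
      · subst hs; simp at h
      · rw [if_neg (by simpa using hs)] at h
        simp only [List.mem_singleton] at h
        subst h
        exact ⟨by simpa using hs, fun d hd => hcur d (List.mem_reverse.mp hd)⟩
  | cons c rest ih =>
    intro cur acc hcur hacc
    by_cases hc : PySem.Chars.isspace c = true
    · rw [pvGoSpace c hc]
      apply ih
      · simp
      · intro w hw
        by_cases hs : cur = []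
        · subst hs; simp only [List.isEmpty_nil, if_true] at hw; exact hacc w hw
        · rw [if_neg (by simpa using hs)] at hw
          rcases List.mem_cons.mp hw with rfl | hw
          · exact ⟨by simpa using hs, fun d hd => hcur d (List.mem_reverse.mp hd)⟩
          · exact hacc w hw
    · rw [pvGoChar c (by simpa using hc)]
      apply ih
      · intro d hd
        rcases List.mem_cons.mp hd with rfl | hd
        · simpa using hc
        · exact hcur d hd
      · exact hacc

-- consuming a whitespace-free word
lemma pvConsume : ∀ (w rest cur : List Char) (acc : List (List Char)),
    (∀ c ∈ w, PySem.Chars.isspace c = false) →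
    PySem.Chars.split₀.go (w ++ rest) cur acc = PySem.Chars.split₀.go rest (w.reverse ++ cur) acc := by
  intro w
  induction w with
  | nil => intro rest cur acc _; simp
  | cons c t ih =>
    intro rest cur acc h
    rw [List.cons_append, PySem.Chars.split₀.go.eq_def]
    have hc : PySem.Chars.isspace c = false := h c (by simp)
    simp only [hc]
    rw [ih rest (c :: cur) acc (fun d hd => h d (by simp [hd]))]
    simp

-- splitting " ".join(words) gives the words back
lemma pvJoinGo : ∀ (ws acc : List (List Char)),
    (∀ w ∈ ws, w ≠ [] ∧ ∀ c ∈ w, PySem.Chars.isspace c = false) →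
    PySem.Chars.split₀.go (PySem.Chars.join [' '] ws) [] acc = acc.reverse ++ ws := by
  intro ws
  induction ws with
  | nil => intro acc _; rw [PySem.Chars.join_nil, pvGoNil]; simp
  | cons w t ih =>
    intro acc h
    have hw := h w (by simp)
    have hne : w.reverse.isEmpty = false := by
      simp [hw.1]
    cases t with
    | nil =>
      rw [PySem.Chars.join_singleton]
      have h1 := pvConsume w [] [] acc hw.2
      simp only [List.append_nil] at h1
      rw [h1, pvGoNil]
      simp [hne]
    | cons w' t' =>
      rw [PySem.Chars.join_cons_cons]
      have h2 := pvConsume w ([' '] ++ PySem.Chars.join [' '] (w' :: t')) [] acc hw.2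
      simp only [List.cons_append, List.nil_append, List.append_nil, List.append_assoc] at h2 ⊢
      rw [h2, pvGoSpace ' ' (by decide)]
      simp only [hne, Bool.false_eq_true, if_false, List.reverse_reverse]
      rw [ih (w :: acc) (fun u hu => h u (List.mem_cons_of_mem _ hu))]
      simp

lemma pvTokensChars (cs : List Char) :
    PySem.Chars.split₀ (PySem.Chars.join [' '] (PySem.Chars.split₀ (pvReplaceAll cs)))
      = pvTokLoop cs [] [] := by
  have hrepl : pvReplaceAll cs = cs.flatMap (pvExpandP pvPunctB) := by
    have hAB : pvPunctA = pvPunctB := rfl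
    unfold pvReplaceAll
    rw [hAB, pvFoldRepl pvPunctB cs (by decide) (by decide)]
  have hws : PySem.Chars.split₀ (pvReplaceAll cs) = pvTokLoop cs [] [] := by
    rw [hrepl]
    have := pvGoExpand cs [] []
    simpa [PySem.Chars.split₀] using this
  have hgood : ∀ w ∈ PySem.Chars.split₀ (pvReplaceAll cs),
      w ≠ [] ∧ ∀ c ∈ w, PySem.Chars.isspace c = false := by
    intro w hw
    exact pvGoodGo _ [] [] (by simp) (by simp) w hw
  rw [hws] at hgood ⊢
  have := pvJoinGo (pvTokLoop cs [] []) [] hgood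
  simpa [PySem.Chars.split₀] using this

lemma pvTokEq (text : String) : whitespace_tokenize text = pvTokenize text := by
  show PySem.Str.split₀ (PySem.Str.join " "
      (PySem.Str.split₀ (String.ofList (pvReplaceAll text.toList)))) = pvTokenize text
  unfold PySem.Str.split₀ pvTokenize
  refine congrArg (List.map String.ofList) ?_
  rw [PySem.Str.toList_join, show (" " : String).toList = [' '] from rfl]
  simp only [List.map_map, Function.comp_def, String.toList_ofList, List.map_id']
  rw [pvTokensChars]

-- the truncate-or-pad tail in one expression
lemma pvTail (ids : List Int) (m : Int) :
    (if (ids.length : Int) > m then PySem.List.slice ids none (some m)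
     else ids ++ List.replicate (m - (ids.length : Int)).toNat 0)
    = PySem.List.slice ids none (some m) ++ List.replicate (m - (ids.length : Int)).toNat 0 := by
  by_cases h : (ids.length : Int) > m
  · rw [if_pos h]
    have h0 : (m - (ids.length : Int)).toNat = 0 := by omega
    simp [h0]
  · rw [if_neg h]
    have h0 : (0 : Int) ≤ m := le_trans (Int.natCast_nonneg _) (not_lt.mp h)
    rw [PySem.List.slice_to ids h0, List.take_of_length_le (by omega)]

-- ===== VERDICT (by name: the statement is the Claim_ definition above) =====
set_option maxHeartbeats 1000000 in
theorem encode_words_spec : Claim_equal_encode_words := by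
  intro text stoi max_len _
  unfold Spec_encode_words encode_words encode_words_alt
  dsimp only
  rw [pvTokEq]
  exact pvTail _ _
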